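-- pv_equiv track=rewrite | github.com/Dropgunner/agentskills | skills/smart-contract-auditor/scripts/generate_report.py | format_detailed_findings
-- ===== SOURCE A (Python) =====
-- from typing import Dict, List
--
-- FINDING_TEMPLATE = """### [{severity_upper}-{index:03d}] {title}
--
-- **Severity**: {severity}
--
-- **Location**: `{location}`
--
-- **Description**:
-- {description}
--
-- **Impact**:
-- {impact}
--
-- **Recommendation**:
-- {recommendation}
--
-- **Status**: {status}
--
-- ---
-- """
--
-- def format_detailed_findings(findings: List[Dict]) -> str:
--     """Format all findings into detailed sections."""
--     if not findings:
--         return "*No findings to report.*"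
--
--     # Sort by severity
--     severity_order = {"critical": 0, "high": 1, "medium": 2, "low": 3, "informational": 4}
--     sorted_findings = sorted(
--         findings,
--         key=lambda x: severity_order.get(x.get("severity", "informational").lower(), 5)
--     )
--
--     sections = []
--     for i, finding in enumerate(sorted_findings, 1):
--         severity = finding.get("severity", "informational")
--
--         section = FINDING_TEMPLATE.format(
--             severity_upper=severity.upper(),
--             index=i,
--             title=finding.get("title", "Untitled Finding"),
--             severity=severity.capitalize(),
--             location=finding.get("location", "Unknown"),
--             description=finding.get("description", "No description provided."),
--             impact=finding.get("impact", "Impact not assessed."),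
--             recommendation=finding.get("recommendation", "No recommendation provided."),
--             status=finding.get("status", "Open")
--         )
--         sections.append(section)
--
--     return "\n".join(sections)
-- ===== SOURCE B (Python) =====
-- from typing import Dict, List
--
--
-- def _rank(finding):
--     s = finding.get("severity", "informational").lower()
--     if s == "critical":
--         return 0
--     if s == "high":
--         return 1
--     if s == "medium":
--         return 2
--     if s == "low":
--         return 3
--     if s == "informational":
--         return 4
--     return 5
--
--
-- def _section(i, f):
--     sev = f.get("severity", "informational")
--     return "".join([
--         "### [", sev.upper(), "-", str(i).zfill(3), "] ",
--         f.get("title", "Untitled Finding"),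
--         "\n\n**Severity**: ", sev[:1].upper() + sev[1:].lower(),
--         "\n\n**Location**: `", f.get("location", "Unknown"),
--         "`\n\n**Description**:\n", f.get("description", "No description provided."),
--         "\n\n**Impact**:\n", f.get("impact", "Impact not assessed."),
--         "\n\n**Recommendation**:\n", f.get("recommendation", "No recommendation provided."),
--         "\n\n**Status**: ", f.get("status", "Open"),
--         "\n\n---\n",
--     ])
--
--
-- def format_detailed_findings(findings: List[Dict]) -> str:
--     """Stable bucket partition by severity rank (no comparison sort), then one
--     formatting pass joining template pieces."""
--     if not findings:
--         return "*No findings to report.*"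
--     buckets = [[], [], [], [], [], []]
--     for f in findings:
--         buckets[_rank(f)].append(f)
--     sections = []
--     i = 0
--     for bucket in buckets:
--         for f in bucket:
--             i += 1
--             sections.append(_section(i, f))
--     return "\n".join(sections)
-- ===== Notes on version B (the rewrite author's own statement) =====
-- stated objective: alternative
-- what changed: Replaces the comparison sort by a single stable partition pass into six severity-rank buckets (dict-based key replaced by an if-chain rank, enumerate replaced by a counter threaded through the buckets, and the template format replaced by joining the literal template pieces).
import Mathlib
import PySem

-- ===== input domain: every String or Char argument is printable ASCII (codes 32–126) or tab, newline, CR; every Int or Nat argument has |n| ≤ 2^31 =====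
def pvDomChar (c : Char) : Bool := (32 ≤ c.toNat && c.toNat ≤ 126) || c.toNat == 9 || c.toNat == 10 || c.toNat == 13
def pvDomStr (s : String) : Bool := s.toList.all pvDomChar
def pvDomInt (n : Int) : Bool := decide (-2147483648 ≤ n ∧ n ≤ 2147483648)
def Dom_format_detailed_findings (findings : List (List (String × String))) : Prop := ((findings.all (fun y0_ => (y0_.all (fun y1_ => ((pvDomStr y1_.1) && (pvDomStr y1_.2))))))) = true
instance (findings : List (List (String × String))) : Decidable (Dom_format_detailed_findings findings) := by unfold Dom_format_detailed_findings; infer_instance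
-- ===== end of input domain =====

-- B replaces A's comparison sort by a single stable pass into six severity-rank
-- buckets (counter threaded through the buckets, template pieces joined): a
-- different algorithm, same output.


-- ===== PORT A =====
-- '{index:03d}' for a positive index is str(i).zfill(3); .capitalize() is ported
-- by hand (first char uppercased, the rest lowered; exact on the ASCII domain).
def pyCapitalize (s : String) : String :=
  match s.toList with
  | [] => ""
  | c :: rest => String.ofList (PySem.Chars.upperChar c :: PySem.Chars.lower rest)

def renderSection (i : Int) (f : List (String × String)) : String :=
  let d := PySem.Dict.ofList f
  let severity := d.getD "severity" "informational"
  "### [" ++ PySem.Str.upper severity ++ "-" ++ PySem.Str.zfill (PySem.Int.toStr i) 3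
    ++ "] " ++ d.getD "title" "Untitled Finding"
    ++ "\n\n**Severity**: " ++ pyCapitalize severity
    ++ "\n\n**Location**: `" ++ d.getD "location" "Unknown"
    ++ "`\n\n**Description**:\n" ++ d.getD "description" "No description provided."
    ++ "\n\n**Impact**:\n" ++ d.getD "impact" "Impact not assessed."
    ++ "\n\n**Recommendation**:\n" ++ d.getD "recommendation" "No recommendation provided."
    ++ "\n\n**Status**: " ++ d.getD "status" "Open"
    ++ "\n\n---\n"

-- severity_order.get(x.get("severity", "informational").lower(), 5) — A's sort key
def sevOrder : PySem.Dict String Int :=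
  PySem.Dict.ofList [("critical", 0), ("high", 1), ("medium", 2), ("low", 3), ("informational", 4)]

def sevKey (f : List (String × String)) : Int :=
  sevOrder.getD (PySem.Str.lower ((PySem.Dict.ofList f).getD "severity" "informational")) 5

def format_detailed_findings (findings : List (List (String × String))) : String :=
  if findings = [] then "*No findings to report.*"
  else
    let sorted_findings := PySem.List.sorted findings (fun x => sevKey x)
    let sections := (PySem.List.enumerate sorted_findings 1).map (fun p => renderSection p.1 p.2)
    PySem.Str.join "\n" sections

-- ===== PORT B =====
-- _rank: if-chain on the lowered severity
def fdfRank (f : List (String × String)) : Int :=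
  let s := PySem.Str.lower ((PySem.Dict.ofList f).getD "severity" "informational")
  if s = "critical" then 0
  else if s = "high" then 1
  else if s = "medium" then 2
  else if s = "low" then 3
  else if s = "informational" then 4
  else 5

-- _section: "".join of the template pieces; sev[:1].upper() + sev[1:].lower()
def fdfSection (i : Int) (f : List (String × String)) : String :=
  let sev := (PySem.Dict.ofList f).getD "severity" "informational"
  PySem.Str.join "" [
    "### [", PySem.Str.upper sev, "-", PySem.Str.zfill (PySem.Int.toStr i) 3, "] ",
    (PySem.Dict.ofList f).getD "title" "Untitled Finding",
    "\n\n**Severity**: ",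
    String.ofList ((sev.toList.take 1).map PySem.Chars.upperChar ++ PySem.Chars.lower (sev.toList.drop 1)),
    "\n\n**Location**: `", (PySem.Dict.ofList f).getD "location" "Unknown",
    "`\n\n**Description**:\n", (PySem.Dict.ofList f).getD "description" "No description provided.",
    "\n\n**Impact**:\n", (PySem.Dict.ofList f).getD "impact" "Impact not assessed.",
    "\n\n**Recommendation**:\n", (PySem.Dict.ofList f).getD "recommendation" "No recommendation provided.",
    "\n\n**Status**: ", (PySem.Dict.ofList f).getD "status" "Open",
    "\n\n---\n"]

-- inner 'for f in bucket: i += 1; append(_section(i, f))'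
def fdfEmitBucket : Int → List (List (String × String)) → List String
  | _, [] => []
  | i, f :: fs => fdfSection (i + 1) f :: fdfEmitBucket (i + 1) fs

-- outer 'for bucket in buckets' loop, threading the counter i
def fdfEmit : Int → List (List (List (String × String))) → List String
  | _, [] => []
  | i, b :: bs => fdfEmitBucket i b ++ fdfEmit (i + b.length) bs

def format_detailed_findings_alt (findings : List (List (String × String))) : String :=
  if findings = [] then "*No findings to report.*"
  else
    let buckets := findings.foldl
      (fun bs f => bs.modify (fdfRank f).toNat (fun b => b ++ [f])) [[], [], [], [], [], []]
    PySem.Str.join "\n" (fdfEmit 0 buckets)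

-- ===== PRECONDITION & SPEC =====
def Spec_format_detailed_findings (findings : List (List (String × String))) (out : String) : Prop := out = format_detailed_findings_alt findings
instance (findings : List (List (String × String))) (out : String) : Decidable (Spec_format_detailed_findings findings out) := by unfold Spec_format_detailed_findings; infer_instance

-- ===== CLAIM =====
def Claim_equal_format_detailed_findings : Prop := ∀ (findings : List (List (String × String))), Dom_format_detailed_findings findings → Spec_format_detailed_findings findings (format_detailed_findings findings)

-- ===== LEMMAS AND PROOFS =====

theorem rank_eq_sevKey (f : List (String × String)) : fdfRank f = sevKey f := by
  unfold fdfRank sevKey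
  dsimp only
  generalize PySem.Str.lower ((PySem.Dict.ofList f).getD "severity" "informational") = s
  have hit : sevOrder.items
      = [("critical", 0), ("high", 1), ("medium", 2), ("low", 3), ("informational", 4)] := rfl
  by_cases h0 : s = "critical"
  · subst h0; decide
  by_cases h1 : s = "high"
  · subst h1; decide
  by_cases h2 : s = "medium"
  · subst h2; decide
  by_cases h3 : s = "low"
  · subst h3; decide
  by_cases h4 : s = "informational"
  · subst h4; decide
  have e0 : ("critical" == s) = false := by simp [Ne.symm h0]
  have e1 : ("high" == s) = false := by simp [Ne.symm h1]
  have e2 : ("medium" == s) = false := by simp [Ne.symm h2]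
  have e3 : ("low" == s) = false := by simp [Ne.symm h3]
  have e4 : ("informational" == s) = false := by simp [Ne.symm h4]
  simp only [PySem.Dict.getD, PySem.Dict.get?, hit, List.find?]
  simp [e0, e1, e2, e3, e4, h0, h1, h2, h3, h4]

theorem sevKey_mem (f : List (String × String)) : sevKey f ∈ ([0, 1, 2, 3, 4, 5] : List Int) := by
  rw [← rank_eq_sevKey]
  unfold fdfRank
  dsimp only
  split_ifs <;> simp

theorem insertBy_append_skip {α : Type} (b : α → α → Bool) (x : α) (as bs : List α)
    (h : ∀ y ∈ as, b x y = false) :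
    PySem.List.insertBy b x (as ++ bs) = as ++ PySem.List.insertBy b x bs := by
  induction as with
  | nil => rfl
  | cons a as ih =>
    simp only [List.cons_append, PySem.List.insertBy, h a (by simp)]
    simp only [Bool.false_eq_true, if_false, List.cons.injEq, true_and]
    exact ih (fun y hy => h y (by simp [hy]))

theorem insertBy_all_before {α : Type} (b : α → α → Bool) (x : α) (ys : List α)
    (h : ∀ y ∈ ys, b x y = true) :
    PySem.List.insertBy b x ys = x :: ys := by
  cases ys with
  | nil => rfl
  | cons y ys => simp [PySem.List.insertBy, h y (by simp)]

theorem mem_filter_key {α : Type} (k : α → Int) (r : Int) (xs : List α) (y : α)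
    (hy : y ∈ xs.filter (fun z => k z == r)) : k y = r := by
  simpa using (List.of_mem_filter hy)

theorem bucket_step {α : Type} (k : α → Int) (x : α) :
    ∀ (rs : List Int), rs.Pairwise (· < ·) → k x ∈ rs → ∀ (xs : List α),
    PySem.List.insertBy (fun a b => decide (k a < k b)) x
        (rs.flatMap (fun r => xs.filter (fun y => k y == r)))
      = rs.flatMap (fun r => (xs ++ [x]).filter (fun y => k y == r)) := by
  intro rs
  induction rs with
  | nil => intro _ hx; exact absurd hx (by simp)
  | cons r rs ih =>
    intro hp hx xs
    have hlt : ∀ r' ∈ rs, r < r' := (List.pairwise_cons.mp hp).1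
    by_cases hk : k x = r
    · rw [List.flatMap_cons, insertBy_append_skip _ _ _ _
        (fun y hy => by simp [mem_filter_key k r xs y hy, hk])]
      rw [insertBy_all_before _ _ _ (fun y hy => by
        rcases List.mem_flatMap.mp hy with ⟨r', hr', hy'⟩
        have := mem_filter_key k r' xs y hy'
        simp [this, hk, hlt r' hr'])]
      rw [List.flatMap_cons]
      have h1 : (xs ++ [x]).filter (fun y => k y == r) = xs.filter (fun y => k y == r) ++ [x] := by
        simp [List.filter_append, hk]
      have h2 : rs.flatMap (fun r' => (xs ++ [x]).filter (fun y => k y == r'))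
          = rs.flatMap (fun r' => xs.filter (fun y => k y == r')) := by
        refine List.flatMap_congr (fun r' hr' => ?_)
        have : ¬ (k x = r') := by have := hlt r' hr'; omega
        simp [List.filter_append, this]
      rw [h1, h2]; simp
    · have hx' : k x ∈ rs := by
        rcases List.mem_cons.mp hx with h | h
        · exact absurd h hk
        · exact h
      have hgt : r < k x := hlt _ hx'
      rw [List.flatMap_cons, insertBy_append_skip _ _ _ _
        (fun y hy => by simp [mem_filter_key k r xs y hy]; omega)]
      rw [ih (List.pairwise_cons.mp hp).2 hx' xs, List.flatMap_cons]
      have h1 : (xs ++ [x]).filter (fun y => k y == r) = xs.filter (fun y => k y == r) := by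
        simp [List.filter_append]; omega
      rw [h1]

theorem sorted_eq_buckets {α : Type} (k : α → Int) (rs : List Int)
    (hp : rs.Pairwise (· < ·)) (xs : List α) (hall : ∀ x ∈ xs, k x ∈ rs) :
    PySem.List.sorted xs (fun x => k x) false
      = rs.flatMap (fun r => xs.filter (fun y => k y == r)) := by
  rw [PySem.List.sorted_eq_foldl_insertBy]
  induction xs using List.reverseRecOn with
  | nil => simp
  | append_singleton xs x ih =>
    rw [List.foldl_append, List.foldl_cons, List.foldl_nil,
      ih (fun y hy => hall y (by simp [hy])),
      bucket_step k x rs hp (hall x (by simp))]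

-- B's fold fills exactly the six filter-buckets (stable: input order kept)
theorem foldl_buckets {α : Type} (k : α → Int) (xs : List α)
    (hk : ∀ x ∈ xs, k x ∈ ([0, 1, 2, 3, 4, 5] : List Int)) :
    ∀ a0 a1 a2 a3 a4 a5 : List α,
    xs.foldl (fun bs x => bs.modify (k x).toNat (fun b => b ++ [x])) [a0, a1, a2, a3, a4, a5]
      = [a0 ++ xs.filter (fun y => k y == 0), a1 ++ xs.filter (fun y => k y == 1),
         a2 ++ xs.filter (fun y => k y == 2), a3 ++ xs.filter (fun y => k y == 3),
         a4 ++ xs.filter (fun y => k y == 4), a5 ++ xs.filter (fun y => k y == 5)] := by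
  induction xs with
  | nil => intro a0 a1 a2 a3 a4 a5; simp
  | cons x xs ih =>
    intro a0 a1 a2 a3 a4 a5
    have hx := hk x (by simp)
    have ih' := ih (fun y hy => hk y (by simp [hy]))
    simp only [List.foldl_cons]
    rcases (by simpa using hx : k x = 0 ∨ k x = 1 ∨ k x = 2 ∨ k x = 3 ∨ k x = 4 ∨ k x = 5)
      with h | h | h | h | h | h <;>
      [ rw [show List.modify [a0, a1, a2, a3, a4, a5] (k x).toNat (fun b => b ++ [x])
            = [a0 ++ [x], a1, a2, a3, a4, a5] from by
          simp [h, List.modify, List.modifyTailIdx, List.modifyTailIdx.go]];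
        rw [show List.modify [a0, a1, a2, a3, a4, a5] (k x).toNat (fun b => b ++ [x])
            = [a0, a1 ++ [x], a2, a3, a4, a5] from by
          simp [h, List.modify, List.modifyTailIdx, List.modifyTailIdx.go]];
        rw [show List.modify [a0, a1, a2, a3, a4, a5] (k x).toNat (fun b => b ++ [x])
            = [a0, a1, a2 ++ [x], a3, a4, a5] from by
          simp [h, List.modify, List.modifyTailIdx, List.modifyTailIdx.go]];
        rw [show List.modify [a0, a1, a2, a3, a4, a5] (k x).toNat (fun b => b ++ [x])
            = [a0, a1, a2, a3 ++ [x], a4, a5] from by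
          simp [h, List.modify, List.modifyTailIdx, List.modifyTailIdx.go]];
        rw [show List.modify [a0, a1, a2, a3, a4, a5] (k x).toNat (fun b => b ++ [x])
            = [a0, a1, a2, a3, a4 ++ [x], a5] from by
          simp [h, List.modify, List.modifyTailIdx, List.modifyTailIdx.go]];
        rw [show List.modify [a0, a1, a2, a3, a4, a5] (k x).toNat (fun b => b ++ [x])
            = [a0, a1, a2, a3, a4, a5 ++ [x]] from by
          simp [h, List.modify, List.modifyTailIdx, List.modifyTailIdx.go]] ] <;>
      rw [ih'] <;>
      simp [List.filter_cons, h, List.append_assoc]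

-- B's sev[:1].upper() + sev[1:].lower() is A's capitalize
theorem capitalize_pieces (s : String) :
    String.ofList ((s.toList.take 1).map PySem.Chars.upperChar
        ++ PySem.Chars.lower (s.toList.drop 1)) = pyCapitalize s := by
  unfold pyCapitalize
  cases h : s.toList <;> simp [h, PySem.Chars.lower]

-- B's "".join of the pieces is A's template concatenation
theorem section_eq (i : Int) (f : List (String × String)) :
    fdfSection i f = renderSection i f := by
  unfold fdfSection renderSection
  dsimp only
  rw [capitalize_pieces]
  apply String.ext
  simp [PySem.Str.toList_join, PySem.Chars.join, List.intercalate, String.toList_append]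

theorem emitBucket_eq (b : List (List (String × String))) :
    ∀ (i : Int), fdfEmitBucket i b
      = (PySem.List.enumerate b (i + 1)).map (fun p => renderSection p.1 p.2) := by
  induction b with
  | nil => intro i; rfl
  | cons f fs ih =>
    intro i
    simp [fdfEmitBucket, PySem.List.enumerate, ih (i + 1), section_eq, add_assoc]

theorem emit_eq (bs : List (List (List (String × String)))) :
    ∀ (i : Int), fdfEmit i bs
      = (PySem.List.enumerate bs.flatten (i + 1)).map (fun p => renderSection p.1 p.2) := by
  induction bs with
  | nil => intro i; rfl
  | cons b rest ih =>
    intro i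
    rw [List.flatten_cons]
    rw [show fdfEmit i (b :: rest) = fdfEmitBucket i b ++ fdfEmit (i + b.length) rest from rfl]
    rw [PySem.List.enumerate_append, List.map_append, emitBucket_eq, ih]
    have harith : i + (b.length : Int) + 1 = i + 1 + (b.length : Int) := by ring
    rw [harith]

-- ===== VERDICT =====
theorem format_detailed_findings_spec : Claim_equal_format_detailed_findings := by
  intro findings _
  unfold Spec_format_detailed_findings format_detailed_findings format_detailed_findings_alt
  by_cases h : findings = []
  · simp [h]
  · simp only [h, if_false]
    have hb := foldl_buckets sevKey findings (fun x _ => sevKey_mem x) [] [] [] [] [] []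
    have hfun : (fun bs f => List.modify bs (fdfRank f).toNat (fun b => b ++ [f]))
        = (fun bs (f : List (String × String)) =>
            List.modify bs (sevKey f).toNat (fun b => b ++ [f])) := by
      funext bs f; rw [rank_eq_sevKey]
    rw [hfun, hb, emit_eq]
    rw [sorted_eq_buckets sevKey ([0, 1, 2, 3, 4, 5] : List Int)
      (by decide) findings (fun x _ => sevKey_mem x)]
    simp [List.flatMap_cons]
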